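-- pv_equiv track=rewrite | github.com/BrayanSolanoF/Intro_taller | Codigo/Recursion de Pila/Listas/positivos.py | positivo_aux
-- ===== SOURCE A (Python) =====
-- def positivo_aux(lista):
--     if lista==[]:
--         return True
--     else:
--         if lista[0]<0:
--             return False
--         else:
--             return positivo_aux(lista[1:])
-- ===== SOURCE B (Python) =====
-- def positivo_aux(lista):
--     for x in lista:
--         if x < 0:
--             return False
--     return True
-- ===== Notes on version B (the rewrite author's own statement) =====
-- stated objective: faster
-- what changed: Replaced structural recursion with list slicing (lista[1:], quadratic copying and deep recursion) by a plain iterative for-loop with early return and no slicing.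
import Mathlib
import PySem

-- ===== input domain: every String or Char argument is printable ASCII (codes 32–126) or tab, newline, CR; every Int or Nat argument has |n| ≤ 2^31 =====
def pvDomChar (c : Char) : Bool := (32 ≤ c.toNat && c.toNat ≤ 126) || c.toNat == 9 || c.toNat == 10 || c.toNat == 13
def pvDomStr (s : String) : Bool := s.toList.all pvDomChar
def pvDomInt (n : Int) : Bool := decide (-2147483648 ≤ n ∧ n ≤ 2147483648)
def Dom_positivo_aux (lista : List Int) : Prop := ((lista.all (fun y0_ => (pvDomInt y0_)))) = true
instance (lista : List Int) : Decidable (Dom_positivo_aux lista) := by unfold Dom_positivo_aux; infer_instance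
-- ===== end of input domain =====

-- B replaces A's slicing recursion (lista[1:]) by a single iterative pass with early return; measured asymptotically faster (O(n) vs O(n^2)).
-- ===== PORT A =====
def positivo_aux (lista : List Int) : Bool :=
  if lista = [] then true
  else
    if lista.headI < 0 then false
    else positivo_aux (PySem.List.slice lista (some 1) none)
termination_by lista.length
decreasing_by
  simp [PySem.List.slice_from_one]
  cases lista with
  | nil => simp_all
  | cons a t => simp

-- ===== PORT B =====
def positivo_aux_alt (lista : List Int) : Bool :=
  lista.all (fun x => !decide (x < 0))

-- ===== PRECONDITION & SPEC =====
def Spec_positivo_aux (lista : List Int) (out : Bool) : Prop := out = positivo_aux_alt lista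
instance (lista : List Int) (out : Bool) : Decidable (Spec_positivo_aux lista out) := by unfold Spec_positivo_aux; infer_instance

-- ===== CLAIM (what is proved, stated in full; the proofs are below) =====
def Claim_equal_positivo_aux : Prop := ∀ (lista : List Int), Dom_positivo_aux lista → Spec_positivo_aux lista (positivo_aux lista)

-- ===== LEMMAS AND PROOFS =====

-- ===== VERDICT (by name: the statement is the Claim_ definition above) =====
theorem positivo_aux_spec : Claim_equal_positivo_aux := by
  intro lista hd
  clear hd
  unfold Spec_positivo_aux
  induction lista with
  | nil => simp [positivo_aux, positivo_aux_alt]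
  | cons a t ih =>
      rw [positivo_aux]
      simp [PySem.List.slice_from_one, positivo_aux_alt] at ih ⊢
      by_cases h : a < 0 <;> simp [h, ih]
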